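-- pv_equiv track=rewrite | github.com/Danniilpz/ComputerSecurityPractices | Exam4/main.py | swap_every_second_bit
-- ===== SOURCE A (Python) =====
-- def dec2bin(decString):
--     return bin((int)(decString))[2:]
--
-- def bin2dec(binString):
--     h = 0;
--     value = 1;
--     for letter in reversed(binString):
--         if letter == '1':
--             h += value
--         value *= 2
--     return h
--
-- def swap_every_second_bit(initialByte):
--     if str(initialByte)[:2]=='0b':
--         auxByte=initialByte[2:].rjust(8,'0') #if byte is binary I remove "0b" and extend to 8 bits
--     else:
--         auxByte=dec2bin(initialByte).rjust(8,'0') #if byte is decimal I convert it to binary and extend to 8 bits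
--     finalByte=""
--     for i in range(0,4):
--         aux1=auxByte[0] #I select the first two bits
--         aux2=auxByte[1]
--         finalByte+=str(aux2)+str(aux1) #and swap them in the final byte
--         auxByte=auxByte[2:]
--     return bin2dec(finalByte)
-- ===== SOURCE B (Python) =====
-- def swap_every_second_bit(initialByte):
--     # same parsing/dispatch as the original
--     s = str(initialByte)
--     if s[:2] == '0b':
--         bits = s[2:].rjust(8, '0')
--     else:
--         bits = bin(int(s))[2:].rjust(8, '0')
--     # pack the first 8 characters into an integer ('1' -> 1, anything else -> 0)
--     v = 0
--     for ch in bits[:8]: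
--         v = v * 2 + (1 if ch == '1' else 0)
--     # swap adjacent bit pairs in closed form
--     return ((v & 0xAA) >> 1) | ((v & 0x55) << 1)
-- ===== Notes on version B (the rewrite author's own statement) =====
-- stated objective: alternative
-- what changed: The 4-iteration string-slicing pair swap plus the hand-rolled bin2dec accumulator are replaced by packing the first 8 characters into one integer and swapping adjacent bits with the closed-form masks ((v & 0xAA) >> 1) | ((v & 0x55) << 1); the '0b'/decimal parsing dispatch is kept identical.
import Mathlib
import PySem

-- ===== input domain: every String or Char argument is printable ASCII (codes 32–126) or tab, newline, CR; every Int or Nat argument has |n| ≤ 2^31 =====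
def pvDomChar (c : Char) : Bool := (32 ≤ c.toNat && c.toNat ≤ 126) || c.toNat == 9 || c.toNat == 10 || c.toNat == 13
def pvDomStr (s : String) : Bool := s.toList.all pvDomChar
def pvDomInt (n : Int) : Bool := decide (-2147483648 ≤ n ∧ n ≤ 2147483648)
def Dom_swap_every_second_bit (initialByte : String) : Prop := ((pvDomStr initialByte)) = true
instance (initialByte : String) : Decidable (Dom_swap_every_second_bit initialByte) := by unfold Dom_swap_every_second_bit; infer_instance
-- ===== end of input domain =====

-- B replaces the 4-iteration string-slicing pair swap plus hand-rolled bin2dec by packing the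
-- first 8 characters into an integer and swapping adjacent bits with the closed-form masks
-- ((v & 0xAA) >> 1) | ((v & 0x55) << 1); the '0b'/decimal parsing dispatch is kept identical.

-- shared parsing code (textually the same in Source A and Source B):
-- s.rjust(8,'0') — plain left-padding with '0' (no '-' ever reaches it here)
def pvRjust0 (cs : List Char) (w : Nat) : List Char :=
  if w ≤ cs.length then cs else List.replicate (w - cs.length) '0' ++ cs

-- dec2bin: bin(int(s))[2:]; none exactly where int(s) raises ValueError
def dec2bin (decString : List Char) : Option (List Char) :=
  (PySem.Int.ofChars? decString).map
    (fun n => PySem.List.slice (PySem.Int.toBinChars0b n) (some 2) none)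

-- the dispatch at the top of swap_every_second_bit (same in A and B)
def pvParse (s : List Char) : Option (List Char) :=
  if PySem.List.slice s none (some 2) = ['0', 'b'] then
    some (pvRjust0 (PySem.List.slice s (some 2) none) 8)
  else
    (dec2bin s).map (fun t => pvRjust0 t 8)

-- ===== PORT A =====
-- bin2dec: reversed fold, value doubling each step, non-'1' characters count as 0
def bin2dec (binString : List Char) : Int :=
  (binString.reverse.foldl
    (fun (st : Int × Int) letter =>
      (if letter = '1' then st.1 + st.2 else st.1, st.2 * 2)) (0, 1)).1

-- one iteration of A's loop: aux1=auxByte[0]; aux2=auxByte[1]; finalByte+=aux2+aux1; auxByte=auxByte[2:]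
def pvStepA (st : List Char × List Char) (_ : Int) : List Char × List Char :=
  let aux1 := (PySem.List.pyGet? st.2 0).getD ' '  -- in range: |auxByte| ≥ 8 throughout
  let aux2 := (PySem.List.pyGet? st.2 1).getD ' '
  (st.1 ++ [aux2, aux1], PySem.List.slice st.2 (some 2) none)

def swap_every_second_bit (initialByte : String) : Int :=
  match pvParse initialByte.toList with
  | none => 0  -- unreachable under Pre_ (int(s) raised ValueError)
  | some aux0 =>
    let st := (PySem.List.pyRange 0 4 1).foldl pvStepA (([] : List Char), aux0)
    bin2dec st.1

-- ===== PORT B =====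
def swap_every_second_bit_alt (initialByte : String) : Int :=
  match pvParse initialByte.toList with
  | none => 0  -- unreachable under Pre_ (int(s) raised ValueError)
  | some bits =>
    let v := (PySem.List.slice bits none (some 8)).foldl
      (fun (v : Int) ch => v * 2 + (if ch = '1' then 1 else 0)) 0
    PySem.Int.bor (PySem.Int.band v 0xAA >>> 1) (PySem.Int.band v 0x55 <<< 1)

-- ===== PRECONDITION & SPEC =====
-- Pre_ excludes exactly the inputs where A raises ValueError: no '0b' prefix and int(s) fails
def Pre_swap_every_second_bit (initialByte : String) : Prop :=
  PySem.List.slice initialByte.toList none (some 2) = ['0', 'b'] ∨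
    (PySem.Int.ofChars? initialByte.toList).isSome = true
instance (initialByte : String) : Decidable (Pre_swap_every_second_bit initialByte) := by
  unfold Pre_swap_every_second_bit; infer_instance

def pvWitness_swap_every_second_bit : String := "0b1011"

def Spec_swap_every_second_bit (initialByte : String) (out : Int) : Prop := out = swap_every_second_bit_alt initialByte
instance (initialByte : String) (out : Int) : Decidable (Spec_swap_every_second_bit initialByte out) := by unfold Spec_swap_every_second_bit; infer_instance

-- ===== CLAIM (what is proved, stated in full; the proofs are below) =====
def Claim_equal_swap_every_second_bit : Prop := ∀ (initialByte : String), Dom_swap_every_second_bit initialByte → Pre_swap_every_second_bit initialByte → Spec_swap_every_second_bit initialByte (swap_every_second_bit initialByte)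

-- ===== LEMMAS AND PROOFS =====

theorem pvRjust0_len (cs : List Char) (w : Nat) : w ≤ (pvRjust0 cs w).length := by
  unfold pvRjust0
  split
  · omega
  · simp; omega

theorem pvParse_len {s t : List Char} (h : pvParse s = some t) : 8 ≤ t.length := by
  unfold pvParse at h
  split at h
  · cases h; exact pvRjust0_len _ _
  · unfold dec2bin at h
    cases hp : PySem.Int.ofChars? s with
    | none => simp [hp] at h
    | some n => simp [hp] at h; cases h; exact pvRjust0_len _ _

theorem pvStepA_eq (acc : List Char) (a b : Char) (rest : List Char) (k : Int) :
    pvStepA (acc, a :: b :: rest) k = (acc ++ [b, a], rest) := by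
  simp [pvStepA, pysem]

-- the core on any string of ≥ 8 characters: A's pair-swap loop + bin2dec = B's pack-and-mask
set_option maxHeartbeats 2000000 in
theorem pvMain {t : List Char} (h : 8 ≤ t.length) :
    (let st := (PySem.List.pyRange 0 4 1).foldl pvStepA (([] : List Char), t)
     bin2dec st.1) =
    (let v := (PySem.List.slice t none (some 8)).foldl
      (fun (v : Int) ch => v * 2 + (if ch = '1' then 1 else 0)) 0
     PySem.Int.bor (PySem.Int.band v 0xAA >>> 1) (PySem.Int.band v 0x55 <<< 1)) := by
  match t, h with
  | c0 :: c1 :: c2 :: c3 :: c4 :: c5 :: c6 :: c7 :: rest, _ =>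
    have hr : PySem.List.pyRange 0 4 1 = [0, 1, 2, 3] := by decide
    rw [hr]
    simp only [List.foldl, pvStepA_eq, List.nil_append, List.cons_append]
    have h8 : PySem.List.slice (c0 :: c1 :: c2 :: c3 :: c4 :: c5 :: c6 :: c7 :: rest) none (some 8)
        = [c0, c1, c2, c3, c4, c5, c6, c7] := by simp [pysem]
    rw [h8]
    simp only [bin2dec, List.reverse, List.reverseAux, List.foldl]
    split_ifs <;> decide

-- ===== VERDICT (by name: the statement is the Claim_ definition above) =====
theorem swap_every_second_bit_spec : Claim_equal_swap_every_second_bit := by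
  intro s _ _
  unfold Spec_swap_every_second_bit swap_every_second_bit swap_every_second_bit_alt
  cases hp : pvParse s.toList with
  | none => rfl
  | some t => exact pvMain (pvParse_len hp)
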